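-- pv_equiv track=rewrite | github.com/Youngwo0/Algorithm | programmers/Lv. 1/2023. 05. 18/공원 산책.py | solution
-- ===== SOURCE A (Python) =====
-- def solution(park: list, routes: list) -> list:
--     x, y = 0, 0
--     for i in range(len(park)):
--         for j in range(len(park[i])):
--             if park[i][j] == "S":
--                 x, y = j, i
--                 break
--     for route in routes:
--         xx, yy = x, y
--         for step in range(int(route[2])):
--             if route[0] == "E" and xx != len(park[0]) - 1 and park[yy][xx + 1] != "X":
--                 xx += 1
--                 if step == int(route[2]) - 1:
--                     x = xx  # step만큼 움직였으면 위치 초기화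
--             # 서쪽 : 현재 위치가 map 가장 왼쪽이면 안됨, 이동할 곳이 장애물이면 안됨
--             elif route[0] == "W" and xx != 0 and park[yy][xx - 1] != "X":
--                 xx -= 1
--                 if step == int(route[2]) - 1:
--                     x = xx
--             # 남쪽 : 현재 위치가 map 가장 아래쪽이면 안됨, 이동할 곳이 장애물이면 안됨
--             elif route[0] == "S" and yy != len(park) - 1 and park[yy + 1][xx] != "X":
--                 yy += 1
--                 if step == int(route[2]) - 1:
--                     y = yy
--             # 북쪽 : 현재 위치가 map 가장 위쪽이면 안됨, 이동할 곳이 장애물이면 안됨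
--             elif route[0] == "N" and yy != 0 and park[yy - 1][xx] != "X":
--                 yy -= 1
--                 if step == int(route[2]) - 1:
--                     y = yy
--
--     return [y, x]
-- ===== SOURCE B (Python) =====
-- def solution(park: list, routes: list) -> list:
--     x, y = 0, 0
--     for i, row in enumerate(park):
--         j = row.find("S")
--         if j != -1:
--             x, y = j, i
--     deltas = {"E": (1, 0), "W": (-1, 0), "S": (0, 1), "N": (0, -1)}
--     h = len(park)
--     w = len(park[0]) if park else 0
--     for route in routes:
--         d = deltas.get(route[0])
--         n = int(route[2])
--         if d is None:
--             continue
--         dx, dy = d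
--         nx, ny = x + dx * n, y + dy * n
--         if 0 <= nx < w and 0 <= ny < h and all(
--             park[y + dy * k][x + dx * k] != "X" for k in range(1, n + 1)
--         ):
--             x, y = nx, ny
--     return [y, x]
-- ===== Notes on version B (the rewrite author's own statement) =====
-- stated objective: simpler
-- what changed: B locates 'S' with per-row str.find, maps route[0] through a delta table, and replaces A's step-by-step walk with its commit-on-last-step trick by computing the target cell arithmetically and validating bounds plus every intermediate cell in one all() pass, committing all-or-nothing.
-- outside the precondition, e.g. on solution([], ['W 0']): A returns [0, 0], B returns [0, 0]; on solution([''], ['W 1']): A returns [0, 0], B returns [0, 0]; on solution(['a', 'abS'], ['W 1']): A returns [1, 1], B returns [1, 2]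
import Mathlib
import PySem

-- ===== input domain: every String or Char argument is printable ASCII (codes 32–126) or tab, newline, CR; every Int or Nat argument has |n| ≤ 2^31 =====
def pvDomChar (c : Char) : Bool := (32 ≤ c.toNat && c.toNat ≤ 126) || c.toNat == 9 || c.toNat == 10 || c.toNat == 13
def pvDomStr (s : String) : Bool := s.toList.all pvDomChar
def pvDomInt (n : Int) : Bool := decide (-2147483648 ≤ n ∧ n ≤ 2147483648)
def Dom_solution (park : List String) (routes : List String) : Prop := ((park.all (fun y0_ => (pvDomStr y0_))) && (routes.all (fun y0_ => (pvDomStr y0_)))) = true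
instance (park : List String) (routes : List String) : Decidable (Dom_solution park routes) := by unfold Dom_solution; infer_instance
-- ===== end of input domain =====

-- B replaces A's per-step commit-on-last-step simulation by an all-or-nothing route check:
-- compute the target cell arithmetically and test bounds plus every intermediate cell at once
-- (objective: simpler decomposition; same asymptotic cost).


-- shared tiny primitives (indexing only; Python raises there = default never reached inside Pre_)
def pvCell (park : List String) (i j : Int) : Char :=
  (((PySem.List.pyGet? park i).bind (fun s => PySem.Str.pyGet? s j)).getD '?')

def pvCh (s : String) (k : Int) : Char := (PySem.Str.pyGet? s k).getD '?'

-- int(route[2])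
def pvN (r : String) : Int := (PySem.Int.ofStr? (String.ofList [pvCh r 2])).getD 0

-- ===== PORT A =====
-- inner scan loop 'for j in range(len(park[i])): if park[i][j]=="S": x,y=j,i; break'
def pvAFindRow : List Char → Int → Int → Int × Int → Int × Int
  | [], _, _, xy => xy
  | c :: cs, j, i, xy => if c = 'S' then (j, i) else pvAFindRow cs (j + 1) i xy

def pvAScan : List String → Int → Int × Int → Int × Int
  | [], _, xy => xy
  | s :: rest, i, xy => pvAScan rest (i + 1) (pvAFindRow s.toList 0 i xy)

-- len(park[0])
def pvW (park : List String) : Int := ((PySem.List.pyGet? park 0).map PySem.Str.len).getD 0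

-- one iteration of 'for step in range(int(route[2]))'; state ((x, y), (xx, yy))
def pvAStep (park : List String) (r : String) (n : Int)
    (st : (Int × Int) × (Int × Int)) (k : Int) : (Int × Int) × (Int × Int) :=
  let x := st.1.1; let y := st.1.2; let xx := st.2.1; let yy := st.2.2
  if pvCh r 0 = 'E' ∧ xx ≠ pvW park - 1 ∧ pvCell park yy (xx + 1) ≠ 'X' then
    (if k = n - 1 then ((xx + 1, y), (xx + 1, yy)) else ((x, y), (xx + 1, yy)))
  else if pvCh r 0 = 'W' ∧ xx ≠ 0 ∧ pvCell park yy (xx - 1) ≠ 'X' then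
    (if k = n - 1 then ((xx - 1, y), (xx - 1, yy)) else ((x, y), (xx - 1, yy)))
  else if pvCh r 0 = 'S' ∧ yy ≠ (park.length : Int) - 1 ∧ pvCell park (yy + 1) xx ≠ 'X' then
    (if k = n - 1 then ((x, yy + 1), (xx, yy + 1)) else ((x, y), (xx, yy + 1)))
  else if pvCh r 0 = 'N' ∧ yy ≠ 0 ∧ pvCell park (yy - 1) xx ≠ 'X' then
    (if k = n - 1 then ((x, yy - 1), (xx, yy - 1)) else ((x, y), (xx, yy - 1)))
  else st

def pvARoute (park : List String) (p : Int × Int) (r : String) : Int × Int :=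
  ((PySem.List.pyRange 0 (pvN r) 1).foldl (pvAStep park r (pvN r)) (p, p)).1

def solution (park : List String) (routes : List String) : List Int :=
  let s := pvAScan park 0 (0, 0)
  let e := routes.foldl (pvARoute park) s
  [e.2, e.1]

-- ===== PORT B =====
def pvDeltas : PySem.Dict String (Int × Int) :=
  ⟨[("E", (1, 0)), ("W", (-1, 0)), ("S", (0, 1)), ("N", (0, -1))]⟩

-- 'for i, row in enumerate(park): j = row.find("S"); if j != -1: x, y = j, i'
def pvBFind (park : List String) : Int × Int :=
  (PySem.List.enumerate park 0).foldl
    (fun (p : Int × Int) ir =>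
      let j := PySem.Str.find ir.2 "S"
      if j ≠ -1 then (j, ir.1) else p) (0, 0)

-- 'w = len(park[0]) if park else 0'
def pvBW (park : List String) : Int :=
  match park with
  | [] => 0
  | s :: _ => PySem.Str.len s

def pvBMove (park : List String) (p : Int × Int) (r : String) : Int × Int :=
  let d := PySem.Dict.get? pvDeltas (String.ofList [pvCh r 0])
  let n := pvN r
  match d with
  | none => p
  | some (dx, dy) =>
    let nx := p.1 + dx * n
    let ny := p.2 + dy * n
    if 0 ≤ nx ∧ nx < pvBW park ∧ 0 ≤ ny ∧ ny < (park.length : Int) ∧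
        ((PySem.List.pyRange 1 (n + 1) 1).all
          (fun k => pvCell park (p.2 + dy * k) (p.1 + dx * k) != 'X')) = true
    then (nx, ny) else p

def solution_alt (park : List String) (routes : List String) : List Int :=
  let s := pvBFind park
  let e := routes.foldl (pvBMove park) s
  [e.2, e.1]

-- ===== PRECONDITION & SPEC =====
-- route r can be parsed: r[2] exists and is an ASCII digit (exactly when int(r[2]) succeeds)
def pvDigit2 (r : String) : Bool :=
  match PySem.Str.pyGet? r 2 with
  | some c => decide (48 ≤ c.toNat ∧ c.toNat ≤ 57)
  | none => false

-- Pre_ excludes (a) routes whose third character is missing or not a digit — there A raises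
-- ValueError/IndexError in range(int(route[2])) — and (b) when routes is non-empty, empty,
-- zero-width or ragged parks, on whose cells A's walk generally raises IndexError (in the
-- degenerate sub-cases where every walk is blocked before touching a bad cell A still returns;
-- those accidental values are excluded together with the shape).
def Pre_solution (park : List String) (routes : List String) : Prop :=
  routes = [] ∨
    (routes.all pvDigit2 = true ∧ park ≠ [] ∧ 1 ≤ PySem.Str.len (park.headD "") ∧
      ∀ t ∈ park, PySem.Str.len t = PySem.Str.len (park.headD ""))

instance (park : List String) (routes : List String) : Decidable (Pre_solution park routes) := by
  unfold Pre_solution; infer_instance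

def pvWitness_solution : List String × List String := (["SO", "OX"], ["E 1", "S 1", "W 1", "N 1"])

def Spec_solution (park : List String) (routes : List String) (out : List Int) : Prop := out = solution_alt park routes
instance (park : List String) (routes : List String) (out : List Int) : Decidable (Spec_solution park routes out) := by unfold Spec_solution; infer_instance

-- ===== CLAIM (what is proved, stated in full; the proofs are below) =====
def Claim_equal_solution : Prop := ∀ (park : List String) (routes : List String), Dom_solution park routes → Pre_solution park routes → Spec_solution park routes (solution park routes)

-- ===== LEMMAS AND PROOFS =====


-- ---------- generic walk machinery (proof-side) ----------
theorem pvPair_ext {a b c d : Int} (h1 : a = c) (h2 : b = d) : ((a, b) : Int × Int) = (c, d) := by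
  rw [h1, h2]

def pvInB (W H : Int) (q : Int × Int) : Prop := 0 ≤ q.1 ∧ q.1 < W ∧ 0 ≤ q.2 ∧ q.2 < H

def pvGStep (cond : Int × Int → Prop) [DecidablePred cond] (d : Int × Int)
    (commit : Int × Int → Int × Int → Int × Int) (n : Int)
    (st : (Int × Int) × (Int × Int)) (k : Int) : (Int × Int) × (Int × Int) :=
  if cond st.2 then
    (if k = n - 1 then (commit st.1 (st.2.1 + d.1, st.2.2 + d.2), (st.2.1 + d.1, st.2.2 + d.2))
     else (st.1, (st.2.1 + d.1, st.2.2 + d.2)))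
  else st

def pvWalk (cond : Int × Int → Prop) [DecidablePred cond] (d : Int × Int) (p : Int × Int) :
    Nat → Int × Int
  | 0 => p
  | m + 1 =>
    let q := pvWalk cond d p m
    if cond q then (q.1 + d.1, q.2 + d.2) else q

def pvAllOk (cond : Int × Int → Prop) (d : Int × Int) (p : Int × Int) (m : Nat) : Prop :=
  ∀ k : Nat, k < m → cond (p.1 + d.1 * k, p.2 + d.2 * k)

theorem pvGfold_prefix (cond : Int × Int → Prop) [DecidablePred cond] (d : Int × Int)
    (commit : Int × Int → Int × Int → Int × Int) (n : Int) (f p : Int × Int)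
    (m : Nat) (h : (m : Int) ≤ n - 1) :
    (PySem.List.pyRange 0 (m : Int) 1).foldl (pvGStep cond d commit n) (f, p)
      = (f, pvWalk cond d p m) := by
  induction m with
  | zero => simp [PySem.List.pyRange_one_eq_nil, pvWalk]
  | succ m ih =>
    have h0 : ((m : Int) + 1) = ((m + 1 : Nat) : Int) := by push_cast; ring
    have h1 : PySem.List.pyRange 0 ((m + 1 : Nat) : Int) 1
        = PySem.List.pyRange 0 (m : Int) 1 ++ [(m : Int)] := by
      rw [← h0, PySem.List.pyRange_one_succ_right (by positivity)]
    rw [h1, List.foldl_append, ih (by omega)]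
    have hk : (m : Int) ≠ n - 1 := by omega
    simp only [List.foldl_cons, List.foldl_nil, pvGStep, pvWalk, hk, if_false]
    by_cases hc : cond (pvWalk cond d p m) <;> simp [hc]

theorem pvWalk_spec (cond : Int × Int → Prop) [DecidablePred cond] (d p : Int × Int) (m : Nat) :
    (pvAllOk cond d p m ∧ pvWalk cond d p m = (p.1 + d.1 * m, p.2 + d.2 * m)) ∨
      (¬ pvAllOk cond d p m ∧ ¬ cond (pvWalk cond d p m)) := by
  induction m with
  | zero => left; constructor
            · intro k hk; omega
            · simp [pvWalk]
  | succ m ih =>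
    rcases ih with ⟨hok, hw⟩ | ⟨hnok, hnc⟩
    · by_cases hc : cond (pvWalk cond d p m)
      · left
        constructor
        · intro k hk
          rcases Nat.lt_succ_iff_lt_or_eq.mp hk with hk' | rfl
          · exact hok k hk'
          · rw [hw] at hc; exact hc
        · rw [hw] at hc
          simp only [pvWalk, hw, hc, if_true]
          exact pvPair_ext (by push_cast; ring) (by push_cast; ring)
      · right
        constructor
        · intro hall; exact hc (by rw [hw]; exact hall m (Nat.lt_succ_self m))
        · simpa [pvWalk, hc] using hc
    · right
      constructor
      · intro hall; exact hnok (fun k hk => hall k (Nat.lt_succ_of_lt hk))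
      · simpa [pvWalk, hnc] using hnc

-- the all-or-nothing condition B tests, phrased as a Prop
def pvCnd (cell : Int → Int → Char) (W H : Int) (d : Int × Int) (n : Int) (p : Int × Int) : Prop :=
  pvInB W H (p.1 + d.1 * n, p.2 + d.2 * n) ∧
    ∀ k : Int, 1 ≤ k → k ≤ n → cell (p.2 + d.2 * k) (p.1 + d.1 * k) ≠ 'X'

theorem pvAllOk_iff_cnd (cond : Int × Int → Prop) (d : Int × Int)
    (cell : Int → Int → Char) (W H : Int) (p : Int × Int) (n : Int) (hn : 0 ≤ n)
    (hcond : ∀ q, pvInB W H q →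
      (cond q ↔ (pvInB W H (q.1 + d.1, q.2 + d.2) ∧ cell (q.2 + d.2) (q.1 + d.1) ≠ 'X')))
    (hp : pvInB W H p)
    (hd : d = (1, 0) ∨ d = (-1, 0) ∨ d = (0, 1) ∨ d = (0, -1)) :
    pvAllOk cond d p n.toNat ↔ pvCnd cell W H d n p := by
  have hconv : ∀ k : Int, 0 ≤ k → k ≤ n →
      pvInB W H (p.1 + d.1 * n, p.2 + d.2 * n) → pvInB W H (p.1 + d.1 * k, p.2 + d.2 * k) := by
    intro k hk0 hkn htgt
    obtain ⟨a0, a1, a2, a3⟩ := hp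
    obtain ⟨b0, b1, b2, b3⟩ := htgt
    rcases hd with rfl | rfl | rfl | rfl <;>
      refine ⟨?_, ?_, ?_, ?_⟩ <;> simp only at * <;> nlinarith
  constructor
  · intro hall
    -- every prefix position is in bounds
    have hbnd : ∀ k : Nat, k ≤ n.toNat → pvInB W H (p.1 + d.1 * k, p.2 + d.2 * k) := by
      intro k hk
      induction k with
      | zero => simpa using hp
      | succ j ihj =>
        have hj := ihj (by omega)
        have hcj := hall j (by omega)
        have hthis := (hcond _ hj).mp hcj
        have h1' := hthis.1
        dsimp only at h1'
        have harr : (p.1 + d.1 * (j : Int) + d.1, p.2 + d.2 * (j : Int) + d.2)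
            = (p.1 + d.1 * ((j + 1 : Nat) : Int), p.2 + d.2 * ((j + 1 : Nat) : Int)) :=
          pvPair_ext (by push_cast; ring) (by push_cast; ring)
        rw [harr] at h1'
        exact h1'
    constructor
    · have := hbnd n.toNat (le_refl _)
      rwa [Int.toNat_of_nonneg hn] at this
    · intro k hk1 hkn
      have hk : (k - 1).toNat < n.toNat := by omega
      have hj := hbnd (k - 1).toNat (by omega)
      have hcj := hall (k - 1).toNat hk
      have hthis := (hcond _ hj).mp hcj
      have e1 : ((k - 1).toNat : Int) = k - 1 := by omega
      rw [e1] at hthis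
      have hx : p.1 + d.1 * (k - 1) + d.1 = p.1 + d.1 * k := by ring
      have hy : p.2 + d.2 * (k - 1) + d.2 = p.2 + d.2 * k := by ring
      have h2' := hthis.2
      dsimp only at h2'
      rw [hx, hy] at h2'
      exact h2'
  · rintro ⟨htgt, hcells⟩ k hk
    have hkn : (k : Int) < n := by omega
    have hkb := hconv k (by positivity) (by omega) htgt
    rw [hcond _ hkb]
    have hx : p.1 + d.1 * (k : Int) + d.1 = p.1 + d.1 * ((k : Int) + 1) := by ring
    have hy : p.2 + d.2 * (k : Int) + d.2 = p.2 + d.2 * ((k : Int) + 1) := by ring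
    dsimp only
    rw [hx, hy]
    constructor
    · have harr : (p.1 + d.1 * ((k : Int) + 1), p.2 + d.2 * ((k : Int) + 1))
          = ((p.1 + d.1 * ((k : Int) + 1), p.2 + d.2 * ((k : Int) + 1)).1,
             (p.1 + d.1 * ((k : Int) + 1), p.2 + d.2 * ((k : Int) + 1)).2) := rfl
      exact hconv ((k : Int) + 1) (by positivity) (by omega) htgt
    · exact hcells ((k : Int) + 1) (by omega) (by omega)

theorem pvGRoute (cond : Int × Int → Prop) [DecidablePred cond] (d : Int × Int)
    (commit : Int × Int → Int × Int → Int × Int) (n : Int) (hn : 1 ≤ n)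
    (p : Int × Int)
    (hcommit : commit p (p.1 + d.1 * n, p.2 + d.2 * n) = (p.1 + d.1 * n, p.2 + d.2 * n)) :
    (pvAllOk cond d p n.toNat →
      ((PySem.List.pyRange 0 n 1).foldl (pvGStep cond d commit n) (p, p)).1
        = (p.1 + d.1 * n, p.2 + d.2 * n)) ∧
    (¬ pvAllOk cond d p n.toNat →
      ((PySem.List.pyRange 0 n 1).foldl (pvGStep cond d commit n) (p, p)).1 = p) := by
  set M : Nat := (n - 1).toNat with hMdef
  have hM : (M : Int) = n - 1 := by omega
  have hsplit : PySem.List.pyRange 0 n 1 = PySem.List.pyRange 0 (M : Int) 1 ++ [(M : Int)] := by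
    rw [hM, ← PySem.List.pyRange_one_succ_right (by omega)]
    norm_num
  rw [hsplit, List.foldl_append, pvGfold_prefix cond d commit n p p M (by omega)]
  rcases pvWalk_spec cond d p M with ⟨hok, hw⟩ | ⟨hnok, hnc⟩
  · by_cases hc : cond (pvWalk cond d p M)
    · constructor
      · intro _
        rw [hw] at hc
        simp only [List.foldl_cons, List.foldl_nil, pvGStep, hw, hc, if_true]
        rw [if_pos hM]
        have harr : (p.1 + d.1 * (M : Int) + d.1, p.2 + d.2 * (M : Int) + d.2)
            = (p.1 + d.1 * n, p.2 + d.2 * n) :=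
          pvPair_ext (by rw [hM]; ring) (by rw [hM]; ring)
        dsimp only
        rw [harr, hcommit]
      · intro hnall
        exfalso
        apply hnall
        intro k hk
        rcases Nat.lt_or_ge k M with hk' | hk'
        · exact hok k hk'
        · have : k = M := by omega
          subst this; rwa [hw] at hc
    · constructor
      · intro hall
        exact absurd (by rw [hw]; exact hall M (by omega)) hc
      · intro _
        simp [pvGStep, hc]
  · constructor
    · intro hall
      exact absurd (fun k hk => hall k (by omega)) (fun h => hnok h)
    · intro _
      simp [pvGStep, hnc]

-- ---------- characters and digits ----------
theorem pvChar_digit_cases (c : Char) (h1 : 48 ≤ c.toNat) (h2 : c.toNat ≤ 57) :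
    c = '0' ∨ c = '1' ∨ c = '2' ∨ c = '3' ∨ c = '4' ∨
      c = '5' ∨ c = '6' ∨ c = '7' ∨ c = '8' ∨ c = '9' := by
  have hofn := Char.ofNat_toNat c
  have : c.toNat = 48 ∨ c.toNat = 49 ∨ c.toNat = 50 ∨ c.toNat = 51 ∨ c.toNat = 52 ∨
      c.toNat = 53 ∨ c.toNat = 54 ∨ c.toNat = 55 ∨ c.toNat = 56 ∨ c.toNat = 57 := by omega
  rcases this with h | h | h | h | h | h | h | h | h | h <;> rw [h] at hofn <;>
    [left; (right; left); (right; right; left); (right; right; right; left);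
     (right; right; right; right; left); (right; right; right; right; right; left);
     (right; right; right; right; right; right; left);
     (right; right; right; right; right; right; right; left);
     (right; right; right; right; right; right; right; right; left);
     (right; right; right; right; right; right; right; right; right)] <;>
    rw [← hofn] <;> rfl

theorem pvN_nonneg (r : String) (hr : pvDigit2 r = true) : 0 ≤ pvN r ∧ pvN r ≤ 9 := by
  unfold pvDigit2 at hr
  rcases h2 : PySem.Str.pyGet? r 2 with _ | c
  · rw [h2] at hr; simp at hr
  · rw [h2] at hr
    simp only [decide_eq_true_eq] at hr
    have hc : pvCh r 2 = c := by unfold pvCh; rw [h2]; rfl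
    have hn : pvN r = (PySem.Int.ofStr? (String.ofList [c])).getD 0 := by
      simp [pvN, hc]
    rcases pvChar_digit_cases c (by omega) (by omega) with
      rfl | rfl | rfl | rfl | rfl | rfl | rfl | rfl | rfl | rfl <;> rw [hn] <;> constructor <;> decide

theorem pvOfList_singleton_inj (c d : Char) :
    String.ofList [c] = String.ofList [d] ↔ c = d := by
  constructor
  · intro h; have := congrArg String.toList h; simpa using this
  · rintro rfl; rfl

-- ---------- the scan: A's break-loop equals B's enumerate/find fold ----------
theorem pvFindRow_go (cs : List Char) (k : Nat) (i : Int) (xy : Int × Int) :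
    pvAFindRow cs (k : Int) i xy =
      (if PySem.Chars.find.go ['S'] cs k ≠ -1
        then (PySem.Chars.find.go ['S'] cs k, i) else xy) := by
  induction cs generalizing k with
  | nil => simp [pvAFindRow, PySem.Chars.find.go]
  | cons c cs ih =>
    have hgo : PySem.Chars.find.go ['S'] (c :: cs) k =
        if c = 'S' then (k : Int) else PySem.Chars.find.go ['S'] cs (k + 1) := by
      simp only [PySem.Chars.find.go, List.isPrefixOf, Bool.and_true]
      by_cases h : c = 'S'
      · subst h; simp
      · simp [h]; intro h2; exact absurd h2.symm h
    have hknn : ((k : Int)) ≠ -1 := by omega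
    by_cases h : c = 'S'
    · subst h
      have hgo' : PySem.Chars.find.go ['S'] ('S' :: cs) k = (k : Int) := by
        rw [hgo]; simp
      rw [hgo']
      simp [pvAFindRow, hknn]
    · simp only [pvAFindRow, h, if_false, hgo]
      have : (k : Int) + 1 = ((k + 1 : Nat) : Int) := by push_cast; ring
      rw [this, ih]

theorem pvFindRow_eq_find (s : String) (i : Int) (xy : Int × Int) :
    pvAFindRow s.toList 0 i xy =
      (if PySem.Str.find s "S" ≠ -1 then (PySem.Str.find s "S", i) else xy) := by
  have : PySem.Str.find s "S" = PySem.Chars.find.go ['S'] s.toList 0 := by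
    simp [PySem.Str.find, PySem.Chars.find]
  rw [this]
  exact_mod_cast pvFindRow_go s.toList 0 i xy

theorem pvGo_bounds (cs : List Char) (k : Nat)
    (h : PySem.Chars.find.go ['S'] cs k ≠ -1) :
    (k : Int) ≤ PySem.Chars.find.go ['S'] cs k ∧
      PySem.Chars.find.go ['S'] cs k < (k : Int) + cs.length := by
  induction cs generalizing k with
  | nil => simp [PySem.Chars.find.go] at h
  | cons c cs ih =>
    have hgo : PySem.Chars.find.go ['S'] (c :: cs) k =
        if c = 'S' then (k : Int) else PySem.Chars.find.go ['S'] cs (k + 1) := by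
      simp only [PySem.Chars.find.go, List.isPrefixOf, Bool.and_true]
      by_cases h : c = 'S'
      · subst h; simp
      · simp [h]; intro h2; exact absurd h2.symm h
    rw [hgo] at h ⊢
    by_cases hc : c = 'S'
    · rw [if_pos hc]
      refine ⟨le_refl _, ?_⟩
      have h0 : (0:Int) ≤ (cs.length : Int) := by positivity
      have h1 : ((c :: cs).length : Int) = (cs.length : Int) + 1 := by push_cast [List.length_cons]; ring
      omega
    · rw [if_neg hc] at h ⊢
      have := ih (k + 1) h
      push_cast at this ⊢
      constructor <;> [omega; (simp; omega)]

theorem pvScan_eq_bfind (park : List String) :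
    pvAScan park 0 (0, 0) = pvBFind park := by
  suffices h : ∀ (l : List String) (i : Int) (xy : Int × Int),
      pvAScan l i xy =
        (PySem.List.enumerate l i).foldl
          (fun (p : Int × Int) ir =>
            let j := PySem.Str.find ir.2 "S"
            if j ≠ -1 then (j, ir.1) else p) xy by
    rw [pvBFind, ← h]
  intro l
  induction l with
  | nil => intro i xy; simp [pvAScan, PySem.List.enumerate_nil]
  | cons s rest ih =>
    intro i xy
    rw [pvAScan, PySem.List.enumerate_cons, List.foldl_cons, ih, pvFindRow_eq_find]

-- ---------- dictionary lookups in B ----------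
theorem pvDeltas_none (c : Char) (hE : c ≠ 'E') (hW : c ≠ 'W') (hS : c ≠ 'S') (hN : c ≠ 'N') :
    PySem.Dict.get? pvDeltas (String.ofList [c]) = none := by
  have kE : (("E" : String) == String.ofList [c]) = false := by
    simp only [beq_eq_false_iff_ne, ne_eq]
    rw [show ("E" : String) = String.ofList ['E'] from by decide, pvOfList_singleton_inj]
    exact fun h => hE h.symm
  have kW : (("W" : String) == String.ofList [c]) = false := by
    simp only [beq_eq_false_iff_ne, ne_eq]
    rw [show ("W" : String) = String.ofList ['W'] from by decide, pvOfList_singleton_inj]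
    exact fun h => hW h.symm
  have kS : (("S" : String) == String.ofList [c]) = false := by
    simp only [beq_eq_false_iff_ne, ne_eq]
    rw [show ("S" : String) = String.ofList ['S'] from by decide, pvOfList_singleton_inj]
    exact fun h => hS h.symm
  have kN : (("N" : String) == String.ofList [c]) = false := by
    simp only [beq_eq_false_iff_ne, ne_eq]
    rw [show ("N" : String) = String.ofList ['N'] from by decide, pvOfList_singleton_inj]
    exact fun h => hN h.symm
  simp [PySem.Dict.get?, pvDeltas, List.find?, kE, kW, kS, kN]

-- ---------- B's move preserves the bounds invariant ----------
theorem pvBMove_inB (park : List String) (W : Int) (p : Int × Int) (r : String)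
    (hW : pvBW park = W)
    (hp : pvInB W park.length p) :
    pvInB W park.length (pvBMove park p r) := by
  rw [pvBMove]
  rcases PySem.Dict.get? pvDeltas (String.ofList [pvCh r 0]) with _ | ⟨dx, dy⟩
  · exact hp
  · simp only
    split
    · rename_i hcnd
      rw [hW] at hcnd
      exact ⟨hcnd.1, hcnd.2.1, hcnd.2.2.1, hcnd.2.2.2.1⟩
    · exact hp

-- ---------- B's starting point is in bounds ----------
theorem pvBFind_inB (park : List String) (W : Int) (hW : 1 ≤ W) (hH : park ≠ [])
    (hrect : ∀ t ∈ park, PySem.Str.len t = W) :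
    pvInB W park.length (pvBFind park) := by
  rw [pvBFind]
  have key : ∀ (l : List (Int × String)) (xy : Int × Int),
      (∀ ir ∈ l, 0 ≤ ir.1 ∧ ir.1 < park.length ∧ PySem.Str.len ir.2 = W) →
      pvInB W park.length xy →
      pvInB W park.length
        (l.foldl (fun (p : Int × Int) ir =>
          let j := PySem.Str.find ir.2 "S"
          if j ≠ -1 then (j, ir.1) else p) xy) := by
    intro l
    induction l with
    | nil => intro xy _ hxy; simpa using hxy
    | cons ir rest ih =>
      intro xy hmem hxy
      rw [List.foldl_cons]
      apply ih _ (fun q hq => hmem q (List.mem_cons_of_mem _ hq))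
      simp only
      split
      · rename_i hj
        obtain ⟨h0, h1, h2⟩ := hmem ir (List.mem_cons_self)
        have hfind : PySem.Str.find ir.2 "S" = PySem.Chars.find.go ['S'] ir.2.toList 0 := by
          simp [PySem.Str.find, PySem.Chars.find]
        rw [hfind] at hj ⊢
        have := pvGo_bounds ir.2.toList 0 hj
        have hlen : (ir.2.toList.length : Int) = W := by
          rw [← h2]; simp [PySem.Str.len]
        refine ⟨by omega, by omega, h0, h1⟩
      · exact hxy
  apply key
  · intro ir hir
    rw [PySem.List.mem_enumerate_iff] at hir
    obtain ⟨k, hk, rfl⟩ := hir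
    refine ⟨by positivity, by simp; omega, hrect _ (List.getElem_mem hk)⟩
  · refine ⟨by omega, by omega, by omega, ?_⟩
    simpa using List.length_pos_iff.mpr hH


-- ---------- generic per-route theorem: A's step fold equals B's all-or-nothing test ----------
theorem pvDirMain (park : List String) (W H : Int)
    (cond : Int × Int → Prop) [DecidablePred cond] (d : Int × Int)
    (commit : Int × Int → Int × Int → Int × Int) (n : Int) (hn : 0 ≤ n)
    (p : Int × Int) (hp : pvInB W H p)
    (hcond : ∀ q, pvInB W H q →
      (cond q ↔ (pvInB W H (q.1 + d.1, q.2 + d.2) ∧ pvCell park (q.2 + d.2) (q.1 + d.1) ≠ 'X')))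
    (hd : d = (1, 0) ∨ d = (-1, 0) ∨ d = (0, 1) ∨ d = (0, -1))
    (hcommit : commit p (p.1 + d.1 * n, p.2 + d.2 * n) = (p.1 + d.1 * n, p.2 + d.2 * n)) :
    ((PySem.List.pyRange 0 n 1).foldl (pvGStep cond d commit n) (p, p)).1
      = if 0 ≤ p.1 + d.1 * n ∧ p.1 + d.1 * n < W ∧ 0 ≤ p.2 + d.2 * n ∧ p.2 + d.2 * n < H ∧
            ((PySem.List.pyRange 1 (n + 1) 1).all
              (fun k => pvCell park (p.2 + d.2 * k) (p.1 + d.1 * k) != 'X')) = true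
        then (p.1 + d.1 * n, p.2 + d.2 * n) else p := by
  have hcells : ((PySem.List.pyRange 1 (n + 1) 1).all
      (fun k => pvCell park (p.2 + d.2 * k) (p.1 + d.1 * k) != 'X')) = true ↔
      (∀ k : Int, 1 ≤ k → k ≤ n → pvCell park (p.2 + d.2 * k) (p.1 + d.1 * k) ≠ 'X') := by
    rw [List.all_eq_true]
    constructor
    · intro h k h1 h2
      have := h k (PySem.List.mem_pyRange_one.mpr ⟨h1, by omega⟩)
      simpa using this
    · intro h k hk
      have := h k (PySem.List.mem_pyRange_one.mp hk).1 (by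
        have := (PySem.List.mem_pyRange_one.mp hk).2; omega)
      simpa using this
  have hiff : (0 ≤ p.1 + d.1 * n ∧ p.1 + d.1 * n < W ∧ 0 ≤ p.2 + d.2 * n ∧ p.2 + d.2 * n < H ∧
      ((PySem.List.pyRange 1 (n + 1) 1).all
        (fun k => pvCell park (p.2 + d.2 * k) (p.1 + d.1 * k) != 'X')) = true) ↔
      pvCnd (fun i j => pvCell park i j) W H d n p := by
    unfold pvCnd pvInB
    rw [hcells]
    tauto
  by_cases hn0 : n = 0
  · subst hn0
    rw [PySem.List.pyRange_one_eq_nil (le_refl 0)]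
    simp only [List.foldl_nil]
    rw [if_pos ?hcnd]
    case hcnd =>
      obtain ⟨a0, a1, a2, a3⟩ := hp
      have e1 : p.1 + d.1 * 0 = p.1 := by ring
      have e2 : p.2 + d.2 * 0 = p.2 := by ring
      rw [e1, e2]
      refine ⟨a0, a1, a2, a3, ?_⟩
      rw [show (0 : Int) + 1 = 1 from rfl, PySem.List.pyRange_one_eq_nil (le_refl 1)]
      rfl
    exact ((pvPair_ext (by ring) (by ring)).trans Prod.mk.eta).symm
  · rcases pvGRoute cond d commit n (by omega) p hcommit with ⟨Gpos, Gneg⟩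
    have hallIff := pvAllOk_iff_cnd cond d (fun i j => pvCell park i j) W H p n hn hcond hp hd
    by_cases hC : pvCnd (fun i j => pvCell park i j) W H d n p
    · rw [Gpos (hallIff.mpr hC), if_pos (hiff.mpr hC)]
    · rw [Gneg (fun hall => hC (hallIff.mp hall)), if_neg (fun h => hC (hiff.mp h))]

-- ---------- the four direction conditions ----------
theorem pvStep_E (park : List String) (r : String) (n : Int) (hc0 : pvCh r 0 = 'E') :
    pvAStep park r n = pvGStep (fun q => q.1 ≠ pvW park - 1 ∧ pvCell park q.2 (q.1 + 1) ≠ 'X')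
      (1, 0) (fun f q => (q.1, f.2)) n := by
  funext st k
  simp only [pvAStep, pvGStep, hc0,
    eq_false (show ('E':Char) ≠ 'W' by decide), eq_false (show ('E':Char) ≠ 'S' by decide), eq_false (show ('E':Char) ≠ 'N' by decide),
    false_and, if_false]
  norm_num
theorem pvStep_W (park : List String) (r : String) (n : Int) (hc0 : pvCh r 0 = 'W') :
    pvAStep park r n = pvGStep (fun q => q.1 ≠ 0 ∧ pvCell park q.2 (q.1 - 1) ≠ 'X')
      (-1, 0) (fun f q => (q.1, f.2)) n := by
  funext st k
  simp only [pvAStep, pvGStep, hc0,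
    eq_false (show ('W':Char) ≠ 'E' by decide), eq_false (show ('W':Char) ≠ 'S' by decide), eq_false (show ('W':Char) ≠ 'N' by decide),
    false_and, if_false]
  norm_num
  simp only [sub_eq_add_neg]
theorem pvStep_S (park : List String) (r : String) (n : Int) (hc0 : pvCh r 0 = 'S') :
    pvAStep park r n = pvGStep
      (fun q => q.2 ≠ (park.length : Int) - 1 ∧ pvCell park (q.2 + 1) q.1 ≠ 'X')
      (0, 1) (fun f q => (f.1, q.2)) n := by
  funext st k
  simp only [pvAStep, pvGStep, hc0,
    eq_false (show ('S':Char) ≠ 'E' by decide), eq_false (show ('S':Char) ≠ 'W' by decide), eq_false (show ('S':Char) ≠ 'N' by decide),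
    false_and, if_false]
  norm_num
theorem pvStep_N (park : List String) (r : String) (n : Int) (hc0 : pvCh r 0 = 'N') :
    pvAStep park r n = pvGStep (fun q => q.2 ≠ 0 ∧ pvCell park (q.2 - 1) q.1 ≠ 'X')
      (0, -1) (fun f q => (f.1, q.2)) n := by
  funext st k
  simp only [pvAStep, pvGStep, hc0,
    eq_false (show ('N':Char) ≠ 'E' by decide), eq_false (show ('N':Char) ≠ 'W' by decide), eq_false (show ('N':Char) ≠ 'S' by decide),
    false_and, if_false]
  norm_num
  simp only [sub_eq_add_neg]


-- ---------- dictionary hits ----------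
theorem pvDeltas_E : PySem.Dict.get? pvDeltas (String.ofList ['E']) = some (1, 0) := by decide
theorem pvDeltas_W : PySem.Dict.get? pvDeltas (String.ofList ['W']) = some (-1, 0) := by decide
theorem pvDeltas_S : PySem.Dict.get? pvDeltas (String.ofList ['S']) = some (0, 1) := by decide
theorem pvDeltas_N : PySem.Dict.get? pvDeltas (String.ofList ['N']) = some (0, -1) := by decide

-- ---------- one route: A's simulation equals B's all-or-nothing move ----------
theorem pvRoute_eq (park : List String) (s : String) (rest : List String)
    (hpark : park = s :: rest)
    (hrect : ∀ t ∈ park, PySem.Str.len t = PySem.Str.len s)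
    (r : String) (hr : pvDigit2 r = true)
    (p : Int × Int) (hp : pvInB (PySem.Str.len s) park.length p) :
    pvARoute park p r = pvBMove park p r := by
  obtain ⟨hn0, hn9⟩ := pvN_nonneg r hr
  have hpvW : pvW park = PySem.Str.len s := by
    rw [hpark, pvW, PySem.List.pyGet?_zero_cons]; rfl
  have hpvBW : pvBW park = PySem.Str.len s := by rw [hpark]; rfl
  by_cases hE : pvCh r 0 = 'E'
  · have hsome : PySem.Dict.get? pvDeltas (String.ofList [pvCh r 0]) = some (1, 0) := by
      rw [hE]; exact pvDeltas_E
    rw [pvARoute, pvStep_E park r (pvN r) hE]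
    simp only [pvBMove, hsome, hpvBW]
    refine (pvDirMain park (PySem.Str.len s) (park.length)
        (fun q => q.1 ≠ pvW park - 1 ∧ pvCell park q.2 (q.1 + 1) ≠ 'X') (1, 0)
        (fun f q => (q.1, f.2)) (pvN r) hn0 p hp ?_ (Or.inl rfl)
        (pvPair_ext rfl (by ring))).trans ?_
    · intro q hq
      obtain ⟨a0, a1, a2, a3⟩ := hq
      rw [hpvW]
      unfold pvInB
      dsimp only
      constructor
      · rintro ⟨h1, h2⟩
        exact ⟨⟨by omega, by omega, by omega, by omega⟩, by simpa using h2⟩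
      · rintro ⟨⟨b0, b1, b2, b3⟩, h2⟩
        exact ⟨by omega, by simpa using h2⟩
    · rfl
  · by_cases hW : pvCh r 0 = 'W'
    · have hsome : PySem.Dict.get? pvDeltas (String.ofList [pvCh r 0]) = some (-1, 0) := by
        rw [hW]; exact pvDeltas_W
      rw [pvARoute, pvStep_W park r (pvN r) hW]
      simp only [pvBMove, hsome, hpvBW]
      refine (pvDirMain park (PySem.Str.len s) (park.length)
          (fun q => q.1 ≠ 0 ∧ pvCell park q.2 (q.1 - 1) ≠ 'X') (-1, 0)
          (fun f q => (q.1, f.2)) (pvN r) hn0 p hp ?_ (Or.inr (Or.inl rfl))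
          (pvPair_ext rfl (by ring))).trans ?_
      · intro q hq
        obtain ⟨a0, a1, a2, a3⟩ := hq
        unfold pvInB
        dsimp only
        constructor
        · rintro ⟨h1, h2⟩
          refine ⟨⟨by omega, by omega, by omega, by omega⟩, ?_⟩
          rw [show q.1 + -1 = q.1 - 1 by ring]
          simpa using h2
        · rintro ⟨⟨b0, b1, b2, b3⟩, h2⟩
          rw [show q.1 + -1 = q.1 - 1 by ring] at h2
          exact ⟨by omega, by simpa using h2⟩
      · rfl
    · by_cases hS : pvCh r 0 = 'S'
      · have hsome : PySem.Dict.get? pvDeltas (String.ofList [pvCh r 0]) = some (0, 1) := by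
          rw [hS]; exact pvDeltas_S
        rw [pvARoute, pvStep_S park r (pvN r) hS]
        simp only [pvBMove, hsome, hpvBW]
        refine (pvDirMain park (PySem.Str.len s) (park.length)
            (fun q => q.2 ≠ (park.length : Int) - 1 ∧ pvCell park (q.2 + 1) q.1 ≠ 'X') (0, 1)
            (fun f q => (f.1, q.2)) (pvN r) hn0 p hp ?_ (Or.inr (Or.inr (Or.inl rfl)))
            (pvPair_ext (by ring) rfl)).trans ?_
        · intro q hq
          obtain ⟨a0, a1, a2, a3⟩ := hq
          unfold pvInB
          dsimp only
          constructor
          · rintro ⟨h1, h2⟩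
            exact ⟨⟨by omega, by omega, by omega, by omega⟩, by simpa using h2⟩
          · rintro ⟨⟨b0, b1, b2, b3⟩, h2⟩
            exact ⟨by omega, by simpa using h2⟩
        · rfl
      · by_cases hN : pvCh r 0 = 'N'
        · have hsome : PySem.Dict.get? pvDeltas (String.ofList [pvCh r 0]) = some (0, -1) := by
            rw [hN]; exact pvDeltas_N
          rw [pvARoute, pvStep_N park r (pvN r) hN]
          simp only [pvBMove, hsome, hpvBW]
          refine (pvDirMain park (PySem.Str.len s) (park.length)
              (fun q => q.2 ≠ 0 ∧ pvCell park (q.2 - 1) q.1 ≠ 'X') (0, -1)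
              (fun f q => (f.1, q.2)) (pvN r) hn0 p hp ?_ (Or.inr (Or.inr (Or.inr rfl)))
              (pvPair_ext (by ring) rfl)).trans ?_
          · intro q hq
            obtain ⟨a0, a1, a2, a3⟩ := hq
            unfold pvInB
            dsimp only
            constructor
            · rintro ⟨h1, h2⟩
              refine ⟨⟨by omega, by omega, by omega, by omega⟩, ?_⟩
              rw [show q.2 + -1 = q.2 - 1 by ring]
              simpa using h2
            · rintro ⟨⟨b0, b1, b2, b3⟩, h2⟩
              rw [show q.2 + -1 = q.2 - 1 by ring] at h2
              exact ⟨by omega, by simpa using h2⟩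
          · rfl
        · have hnone := pvDeltas_none (pvCh r 0) hE hW hS hN
          have hid : pvAStep park r (pvN r) = fun st (_ : Int) => st := by
            funext st k
            simp only [pvAStep, eq_false hE, eq_false hW, eq_false hS, eq_false hN,
              false_and, if_false]
          rw [pvARoute, hid, PySem.List.foldl_ignore]
          simp only [pvBMove, hnone]

-- ---------- the loop over routes ----------
set_option maxHeartbeats 2000000 in
theorem pvFold_eq (park : List String) (s : String) (rest : List String)
    (hpark : park = s :: rest)
    (hrect : ∀ t ∈ park, PySem.Str.len t = PySem.Str.len s) :
    ∀ (routes : List String), routes.all pvDigit2 = true →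
      ∀ p : Int × Int, pvInB (PySem.Str.len s) park.length p →
        routes.foldl (pvARoute park) p = routes.foldl (pvBMove park) p := by
  intro routes
  induction routes with
  | nil => intro _ p _; rw [List.foldl_nil, List.foldl_nil]
  | cons r rs ih =>
    intro hall p hp
    rw [List.all_cons, Bool.and_eq_true] at hall
    rw [List.foldl_cons, List.foldl_cons,
      pvRoute_eq park s rest hpark hrect r hall.1 p hp]
    exact ih hall.2 _ (pvBMove_inB park (PySem.Str.len s) p r (by rw [hpark]; rfl) hp)

-- ===== VERDICT (by name: the statement is the Claim_ definition above) =====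
set_option maxHeartbeats 2000000 in
theorem solution_spec : Claim_equal_solution := by
  unfold Claim_equal_solution Spec_solution
  intro park routes _ hpre
  simp only [solution, solution_alt, pvScan_eq_bfind]
  rcases hpre with rfl | ⟨hall, hne, hw1, hrect⟩
  · rw [List.foldl_nil, List.foldl_nil]
  · obtain ⟨s, rest, rfl⟩ : ∃ s rest, park = s :: rest := by
      cases park with
      | nil => exact absurd rfl hne
      | cons a b => exact ⟨a, b, rfl⟩
    have hhead : (s :: rest : List String).headD "" = s := rfl
    rw [hhead] at hw1 hrect
    have hstart := pvBFind_inB (s :: rest) (PySem.Str.len s) hw1 (by simp) hrect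
    rw [pvFold_eq (s :: rest) s rest rfl hrect routes hall (pvBFind (s :: rest)) hstart]
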